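-- pv_equiv track=rewrite | github.com/yejinee/Algorithm | 2023/17615_2.py | solution
-- ===== SOURCE A (Python) =====
-- def solution(ball):
--     """
--     최소이동횟수 계산 funtion
--     - Greedy Algorithm 사용
--     1. 좌/우 한쪽으로 공 몰 때의 횟수 구하기
--         - 같은 색 공인 경우 => 넘어가기
--         - 다른 색 공인 경우 => 같은 색 공 뭉텅이랑 건너뛰기
--     """
--     move_cnt = []
--
--     ## 우측에 R공을 몰아넣는 case
--     rball_cnt = 0
--     case1_cnt = 0
--
--     for i in range(len(ball)):
--         if ball[i] == 'R':
--             rball_cnt += 1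
--         if ball[i] == 'B' and rball_cnt:
--             case1_cnt += 1
--     move_cnt.append(case1_cnt)
--
--     ## 우측에 B공을 몰아넣는 case
--     bball_cnt = 0
--     case2_cnt = 0
--
--     for i in range(len(ball)):
--         if ball[i] == 'B':
--             bball_cnt += 1
--         if ball[i] == 'R' and bball_cnt:
--             case2_cnt += 1
--     move_cnt.append(case2_cnt)
--
--     ## 좌측에 R공을 몰아넣는 case
--     rball_cnt = 0
--     case3_cnt = 0
--     ball.reverse()
--
--     for i in range(len(ball)):
--         if ball[i] == 'R':
--             rball_cnt += 1
--         if ball[i] == 'B' and rball_cnt: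
--             case3_cnt += 1
--     move_cnt.append(case3_cnt)
--
--
--     ## 좌측에 B공을 몰아넣는 case
--     bball_cnt = 0
--     case4_cnt = 0
--
--     for i in range(len(ball)):
--         if ball[i] == 'B':
--             bball_cnt += 1
--         if ball[i] == 'R' and bball_cnt:
--             case4_cnt += 1
--     move_cnt.append(case4_cnt)
--
--     return min(move_cnt)
-- ===== SOURCE B (Python) =====
-- def solution(ball):
--     # One forward pass gathers aggregate counts (nR, nB) and the counts of
--     # balls before the first ball of the other colour; the two right-side
--     # cases are then arithmetic.  The same is done once more after the
--     # in-place reverse (preserving A's side effect) for the left-side cases.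
--     def stats(b):
--         nR = nB = b_before_r = r_before_b = 0
--         seenR = seenB = False
--         for x in b:
--             if x == 'R':
--                 nR += 1
--                 if not seenB:
--                     r_before_b += 1
--                 seenR = True
--             elif x == 'B':
--                 nB += 1
--                 if not seenR:
--                     b_before_r += 1
--                 seenB = True
--         return nR, nB, b_before_r, r_before_b
--
--     nR, nB, bbr, rbb = stats(ball)
--     case1 = nB - bbr
--     case2 = nR - rbb
--     ball.reverse()
--     nR2, nB2, bbr2, rbb2 = stats(ball)
--     case3 = nB2 - bbr2
--     case4 = nR2 - rbb2
--     return min(case1, case2, case3, case4)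
-- ===== Notes on version B (the rewrite author's own statement) =====
-- stated objective: alternative
-- what changed: Replaces A's four separate scan-and-count loops (two over the list, two over its reversal) by two aggregate passes: each pass computes total counts nR, nB and the counts of balls before the first ball of the other colour, and the four cases are obtained by subtraction; both versions reverse ball in place once.
import Mathlib
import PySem

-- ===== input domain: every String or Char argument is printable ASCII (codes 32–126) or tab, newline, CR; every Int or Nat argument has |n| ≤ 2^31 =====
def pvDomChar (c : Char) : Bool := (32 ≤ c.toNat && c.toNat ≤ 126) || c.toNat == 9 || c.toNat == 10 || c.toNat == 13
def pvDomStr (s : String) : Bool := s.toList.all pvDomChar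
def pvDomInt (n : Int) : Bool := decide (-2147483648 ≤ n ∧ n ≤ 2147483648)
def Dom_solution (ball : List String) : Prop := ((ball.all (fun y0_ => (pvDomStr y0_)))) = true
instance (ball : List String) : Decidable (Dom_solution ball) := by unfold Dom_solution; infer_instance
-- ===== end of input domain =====

-- B replaces A's four scan-and-count loops by two passes computing aggregate
-- prefix statistics; both versions reverse `ball` in place once (equivalence is
-- about the return value; B performs the same mutation).

-- ===== PORT A =====
-- one of A's four identical `for` loops: counts colour `tgt` into the running
-- counter r, and counts an `oth` ball whenever r is truthy (≠ 0)
def loopA (tgt oth : String) : List String → Int → Int → Int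
  | [], _, c => c
  | x :: t, r, c =>
    let r' := if x = tgt then r + 1 else r
    let c' := if x = oth ∧ r' ≠ 0 then c + 1 else c
    loopA tgt oth t r' c'

def solution (ball : List String) : Int :=
  let case1 := loopA "R" "B" ball 0 0
  let case2 := loopA "B" "R" ball 0 0
  let rev := ball.reverse
  let case3 := loopA "R" "B" rev 0 0
  let case4 := loopA "B" "R" rev 0 0
  let move_cnt : List Int := [case1, case2, case3, case4]
  match PySem.List.min? move_cnt (fun x => x) with
  | some m => m
  | none => 0

-- ===== PORT B =====
-- Source B's `stats` loop: returns (nR, nB, b_before_r, r_before_b)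
def loopB : List String → Int → Int → Int → Int → Bool → Bool →
    Int × Int × Int × Int
  | [], nR, nB, bbr, rbb, _, _ => (nR, nB, bbr, rbb)
  | x :: t, nR, nB, bbr, rbb, sR, sB =>
    if x = "R" then
      loopB t (nR + 1) nB bbr (if sB then rbb else rbb + 1) true sB
    else if x = "B" then
      loopB t nR (nB + 1) (if sR then bbr else bbr + 1) rbb sR true
    else
      loopB t nR nB bbr rbb sR sB

def solution_alt (ball : List String) : Int :=
  let s := loopB ball 0 0 0 0 false false
  let case1 := s.2.1 - s.2.2.1
  let case2 := s.1 - s.2.2.2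
  let s2 := loopB ball.reverse 0 0 0 0 false false
  let case3 := s2.2.1 - s2.2.2.1
  let case4 := s2.1 - s2.2.2.2
  min case1 (min case2 (min case3 case4))

-- ===== PRECONDITION & SPEC =====
def Spec_solution (ball : List String) (out : Int) : Prop := out = solution_alt ball
instance (ball : List String) (out : Int) : Decidable (Spec_solution ball out) := by unfold Spec_solution; infer_instance

-- ===== CLAIM (what is proved, stated in full; the proofs are below) =====
def Claim_equal_solution : Prop := ∀ (ball : List String), Dom_solution ball → Spec_solution ball (solution ball)

-- ===== LEMMAS AND PROOFS =====

-- number of `oth` balls in l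
def cntO (oth : String) : List String → Int
  | [] => 0
  | x :: t => (if x = oth then 1 else 0) + cntO oth t

-- number of `oth` balls strictly after the first `tgt` ball
def afterFirst (tgt oth : String) : List String → Int
  | [] => 0
  | x :: t => if x = tgt then cntO oth t else afterFirst tgt oth t

theorem loopA_pos (tgt oth : String) (hne : tgt ≠ oth) (l : List String) :
    ∀ r c : Int, 0 < r → loopA tgt oth l r c = c + cntO oth l := by
  induction l with
  | nil => intro r c _; simp [loopA, cntO]
  | cons x t ih =>
    intro r c hr
    by_cases hx : x = tgt
    · have ho : ¬ x = oth := by rw [hx]; exact hne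
      have e : loopA tgt oth (x :: t) r c = loopA tgt oth t (r + 1) c := by
        simp [loopA, hx, hne]
      rw [e, ih _ _ (by omega)]; simp [cntO, ho]
    · by_cases ho : x = oth
      · have e : loopA tgt oth (x :: t) r c = loopA tgt oth t r (c + 1) := by
          simp [loopA, hx, ho, Ne.symm hne, show ¬ r = 0 by omega]
        rw [e, ih _ _ hr]; simp [cntO, ho]; ring
      · have e : loopA tgt oth (x :: t) r c = loopA tgt oth t r c := by
          simp [loopA, hx, ho]
        rw [e, ih _ _ hr]; simp [cntO, ho]

theorem loopA_zero (tgt oth : String) (hne : tgt ≠ oth) (l : List String) :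
    ∀ c : Int, loopA tgt oth l 0 c = c + afterFirst tgt oth l := by
  induction l with
  | nil => intro c; simp [loopA, afterFirst]
  | cons x t ih =>
    intro c
    by_cases hx : x = tgt
    · have ho : ¬ x = oth := by rw [hx]; exact hne
      have e : loopA tgt oth (x :: t) 0 c = loopA tgt oth t 1 c := by
        simp [loopA, hx, hne]
      rw [e, loopA_pos tgt oth hne t 1 c one_pos]; simp [afterFirst, hx]
    · have e : loopA tgt oth (x :: t) 0 c = loopA tgt oth t 0 c := by
        simp [loopA, hx]
      rw [e, ih]; simp [afterFirst, hx]

-- Source B's stats loop, characterised against the same spec functions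
theorem loopB_char (l : List String) :
    ∀ (nR nB bbr rbb : Int) (sR sB : Bool),
      (loopB l nR nB bbr rbb sR sB).2.1 - (loopB l nR nB bbr rbb sR sB).2.2.1
        = (nB - bbr) + (if sR then cntO "B" l else afterFirst "R" "B" l) ∧
      (loopB l nR nB bbr rbb sR sB).1 - (loopB l nR nB bbr rbb sR sB).2.2.2
        = (nR - rbb) + (if sB then cntO "R" l else afterFirst "B" "R" l) := by
  induction l with
  | nil => intro nR nB bbr rbb sR sB; simp [loopB, cntO, afterFirst]
  | cons x t ih =>
    intro nR nB bbr rbb sR sB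
    by_cases hR : x = "R"
    · have e : loopB (x :: t) nR nB bbr rbb sR sB
          = loopB t (nR + 1) nB bbr (if sB then rbb else rbb + 1) true sB := by
        simp [loopB, hR]
      have h := ih (nR + 1) nB bbr (if sB then rbb else rbb + 1) true sB
      rw [e]
      refine ⟨?_, ?_⟩
      · rw [h.1]
        cases sR <;> simp [afterFirst, cntO, hR]
      · rw [h.2]
        cases sB <;> simp [afterFirst, cntO, hR] <;> omega
    · by_cases hB : x = "B"
      · have e : loopB (x :: t) nR nB bbr rbb sR sB
            = loopB t nR (nB + 1) (if sR then bbr else bbr + 1) rbb sR true := by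
          simp [loopB, hR, hB]
        have h := ih nR (nB + 1) (if sR then bbr else bbr + 1) rbb sR true
        rw [e]
        refine ⟨?_, ?_⟩
        · rw [h.1]
          cases sR <;> simp [afterFirst, cntO, hB, hR] <;> omega
        · rw [h.2]
          cases sB <;> simp [afterFirst, cntO, hB, hR]
      · have e : loopB (x :: t) nR nB bbr rbb sR sB
            = loopB t nR nB bbr rbb sR sB := by
          simp [loopB, hR, hB]
        have h := ih nR nB bbr rbb sR sB
        rw [e]
        refine ⟨?_, ?_⟩
        · rw [h.1]; simp [afterFirst, cntO, hR, hB]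
        · rw [h.2]; simp [afterFirst, cntO, hR, hB]

theorem min4_eq (a b c d : Int) :
    (match PySem.List.min? [a, b, c, d] (fun x => x) with
      | some m => m | none => 0) = min a (min b (min c d)) := by
  rw [PySem.List.min?_id_cons]
  simp only [List.foldl]
  simp only [min_def]
  split_ifs <;> omega

-- ===== VERDICT (by name: the statement is the Claim_ definition above) =====
theorem solution_spec : Claim_equal_solution := by
  intro ball _
  unfold Spec_solution solution solution_alt
  have hRB : ("R" : String) ≠ "B" := by decide
  have hBR : ("B" : String) ≠ "R" := by decide
  have h1 := (loopB_char ball 0 0 0 0 false false)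
  have h2 := (loopB_char ball.reverse 0 0 0 0 false false)
  simp only [loopA_zero "R" "B" hRB, loopA_zero "B" "R" hBR, min4_eq]
  rw [h1.1, h1.2, h2.1, h2.2]
  simp
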